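-- pv_equiv track=rewrite | github.com/ianshank/langgraph_multi_agent_mcts | src/framework/mcts/edge_cases.py | validate_action_space
-- ===== SOURCE A (Python) =====
-- def validate_action_space(actions: list[str]) -> list[str]:
--     """
--     Validate action space.
--
--     Args:
--         actions: List of available actions
--
--     Returns:
--         List of violations
--     """
--     violations = []
--
--     if not actions:
--         violations.append("Empty action space")
--         return violations
--
--     # Check for duplicates
--     if len(actions) != len(set(actions)):
--         violations.append("Duplicate actions in action space")
--
--     # Check for empty strings
--     if any(a == "" for a in actions):
--         violations.append("Empty string in actions")
--
--     return violations
-- ===== SOURCE B (Python) =====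
-- def validate_action_space(actions: list[str]) -> list[str]:
--     if not actions:
--         return ["Empty action space"]
--     s = sorted(actions)
--     violations = []
--     if any(x == y for x, y in zip(s, s[1:])):
--         violations.append("Duplicate actions in action space")
--     if "" in actions:
--         violations.append("Empty string in actions")
--     return violations
-- ===== Notes on version B (the rewrite author's own statement) =====
-- stated objective: alternative
-- what changed: Detects duplicates by sorting the list and comparing adjacent elements instead of building a hash set and comparing lengths, and tests empty strings by membership instead of a generator scan.
import Mathlib
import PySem

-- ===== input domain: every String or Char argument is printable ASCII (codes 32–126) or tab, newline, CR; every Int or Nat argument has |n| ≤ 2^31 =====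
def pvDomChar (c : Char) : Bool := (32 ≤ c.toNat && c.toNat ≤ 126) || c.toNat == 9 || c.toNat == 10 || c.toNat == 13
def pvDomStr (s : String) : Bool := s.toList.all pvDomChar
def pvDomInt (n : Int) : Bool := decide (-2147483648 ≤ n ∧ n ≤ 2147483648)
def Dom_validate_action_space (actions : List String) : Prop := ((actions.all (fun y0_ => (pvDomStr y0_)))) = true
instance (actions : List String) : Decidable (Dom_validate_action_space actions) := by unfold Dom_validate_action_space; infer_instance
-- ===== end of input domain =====

-- B detects duplicates by sorting and comparing adjacent elements (instead of A's set-size comparison); alternative algorithm, same results.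

-- ===== PORT A =====
def validate_action_space (actions : List String) : List String :=
  let violations : List String := []
  if actions.isEmpty then
    violations ++ ["Empty action space"]
  else
    let violations :=
      if actions.length ≠ (PySem.Set.ofList actions).length then
        violations ++ ["Duplicate actions in action space"]
      else violations
    let violations :=
      if (actions.any fun a => a == "") then
        violations ++ ["Empty string in actions"]
      else violations
    violations

-- ===== PORT B =====
def validate_action_space_alt (actions : List String) : List String :=
  if actions.isEmpty then ["Empty action space"]
  else
    let s := PySem.List.sorted actions (fun x => x) false
    (if (s.zip s.tail).any (fun p => p.1 == p.2) then
        ["Duplicate actions in action space"] else []) ++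
    (if actions.contains "" then ["Empty string in actions"] else [])

-- ===== PRECONDITION & SPEC =====
def Spec_validate_action_space (actions : List String) (out : List String) : Prop := out = validate_action_space_alt actions
instance (actions : List String) (out : List String) : Decidable (Spec_validate_action_space actions out) := by unfold Spec_validate_action_space; infer_instance

-- ===== CLAIM =====
def Claim_equal_validate_action_space : Prop := ∀ (actions : List String), Dom_validate_action_space actions → Spec_validate_action_space actions (validate_action_space actions)

-- ===== LEMMAS AND PROOFS =====

-- in a ≤-sorted list, some adjacent pair is equal iff the list has a duplicate
theorem adj_dup_iff (s : List String) (h : s.Pairwise (· ≤ ·)) :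
    ((s.zip s.tail).any (fun p => p.1 == p.2)) = true ↔ ¬ s.Nodup := by
  induction s with
  | nil => simp
  | cons x t ih =>
    cases t with
    | nil => simp
    | cons y t' =>
      have hpt : (y :: t').Pairwise (· ≤ ·) := (List.pairwise_cons.mp h).2
      have hxle : ∀ z ∈ y :: t', x ≤ z := (List.pairwise_cons.mp h).1
      have hyle : ∀ z ∈ t', y ≤ z := (List.pairwise_cons.mp hpt).1
      have hih : (((y :: t').zip t').any (fun p => p.1 == p.2)) = true ↔
          ¬(y ∉ t' ∧ t'.Nodup) := by
        have := ih hpt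
        simp only [List.tail_cons, List.nodup_cons] at this
        exact this
      simp only [List.tail_cons, List.zip_cons_cons, List.any_cons, Bool.or_eq_true,
        beq_iff_eq, List.nodup_cons]
      constructor
      · rintro (rfl | hdup)
        · intro hc
          exact hc.1 List.mem_cons_self
        · intro hc
          exact hih.mp hdup ⟨hc.2.1, hc.2.2⟩
      · intro hc
        by_cases hxy : x = y
        · exact Or.inl hxy
        · refine Or.inr (hih.mpr ?_)
          rintro ⟨hy, hnd⟩
          apply hc
          refine ⟨?_, hy, hnd⟩
          intro hx
          rcases List.mem_cons.mp hx with hx2 | hx2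
          · exact hxy hx2
          · exact hxy (le_antisymm (hxle y List.mem_cons_self) (hyle x hx2))

-- "" in l  equals  any(a == "" for a in l)
theorem contains_empty_eq_any (l : List String) :
    l.contains "" = (l.any fun a => a == "") := by
  induction l with
  | nil => rfl
  | cons a t ih =>
    have hb : ("" == a) = (a == "") := by
      by_cases h : a = "" <;> simp [h]
    simp only [List.contains_cons, List.any_cons, ih, hb]

-- set(l) is strictly shorter than l when l has a duplicate
theorem length_ofList_lt_of_not_nodup {l : List String} (h : ¬ l.Nodup) :
    (PySem.Set.ofList l).length < l.length := by
  induction l with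
  | nil => exact absurd List.nodup_nil h
  | cons x l ih =>
    rw [PySem.Set.ofList_cons]
    by_cases hnd : l.Nodup
    · have hx : x ∈ l := by
        by_contra hx
        exact h (List.nodup_cons.mpr ⟨hx, hnd⟩)
      have hx' : x ∈ PySem.Set.ofList l := (PySem.Set.mem_ofList l x).mpr hx
      have : ((PySem.Set.ofList l).discard x).length < (PySem.Set.ofList l).length := by
        unfold PySem.Set.discard
        refine List.length_filter_lt_length_iff_exists.mpr ⟨x, hx', by simp⟩
      calc (x :: (PySem.Set.ofList l).discard x).length
          = ((PySem.Set.ofList l).discard x).length + 1 := by simp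
        _ ≤ (PySem.Set.ofList l).length := this
        _ ≤ l.length := PySem.Set.length_ofList_le l
        _ < (x :: l).length := by simp
    · have h1 : ((PySem.Set.ofList l).discard x).length ≤ (PySem.Set.ofList l).length := by
        unfold PySem.Set.discard
        exact List.length_filter_le _ _
      have := ih hnd
      simp only [List.length_cons]
      omega

theorem length_ofList_ne_iff (l : List String) :
    (l.length ≠ (PySem.Set.ofList l).length) ↔ ¬ l.Nodup := by
  constructor
  · intro hne hnd
    rw [PySem.Set.ofList_eq_self_of_nodup l hnd] at hne; exact hne rfl
  · intro h
    have := length_ofList_lt_of_not_nodup h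
    omega

-- ===== VERDICT =====
theorem validate_action_space_spec : Claim_equal_validate_action_space := by
  intro actions _
  show validate_action_space actions = validate_action_space_alt actions
  unfold validate_action_space validate_action_space_alt
  by_cases hnil : actions.isEmpty
  · simp [hnil]
  · simp only [hnil, Bool.false_eq_true, if_false]
    have hperm : (PySem.List.sorted actions (fun x => x) false).Perm actions :=
      PySem.List.sorted_perm actions (fun x => x) false
    have hdup :
        ((PySem.List.sorted actions (fun x => x) false).zip
          (PySem.List.sorted actions (fun x => x) false).tail).any (fun p => p.1 == p.2) = true
        ↔ actions.length ≠ (PySem.Set.ofList actions).length := by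
      rw [adj_dup_iff _ (PySem.List.sorted_pairwise actions (fun x => x)),
        hperm.nodup_iff, length_ofList_ne_iff]
    rw [contains_empty_eq_any]
    by_cases hd : actions.length ≠ (PySem.Set.ofList actions).length <;>
      by_cases he : (actions.any fun a => a == "") = true <;>
        simp [hd, he, hdup]
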